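-- pv_equiv track=rewrite | github.com/Rtchaik/AoC-2023 | Day14/solution.py | tilting
-- ===== SOURCE A (Python) =====
-- def tilting(data):
--   for line in data:
--     floor_idx = 0
--     for idx,ch in enumerate(line):
--       match ch:
--         case '#':
--           floor_idx = idx+1
--         case 'O':
--           line[idx] = '.'
--           line[floor_idx] = 'O'
--           floor_idx += 1
--   return data
-- ===== SOURCE B (Python) =====
-- def _fill(seg):
--     k = seg.count('O')
--     return ['O'] * k + ['.' if c == 'O' else c for c in seg[k:]]
--
-- def tilting(data):
--     for line in data:
--         out = []
--         seg = []
--         for ch in line: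
--             if ch == '#':
--                 out += _fill(seg)
--                 out.append('#')
--                 seg = []
--             else:
--                 seg.append(ch)
--         line[:] = out + _fill(seg)
--     return data
-- ===== Notes on version B (the rewrite author's own statement) =====
-- stated objective: alternative
-- what changed: A compacts each row with a single pointer-walk that mutates two indices per 'O'; B splits each row into '#'-delimited segments, counts the 'O's per segment and rewrites the segment as that many 'O's followed by the remaining chars with 'O' replaced by '.'.
import Mathlib
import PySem

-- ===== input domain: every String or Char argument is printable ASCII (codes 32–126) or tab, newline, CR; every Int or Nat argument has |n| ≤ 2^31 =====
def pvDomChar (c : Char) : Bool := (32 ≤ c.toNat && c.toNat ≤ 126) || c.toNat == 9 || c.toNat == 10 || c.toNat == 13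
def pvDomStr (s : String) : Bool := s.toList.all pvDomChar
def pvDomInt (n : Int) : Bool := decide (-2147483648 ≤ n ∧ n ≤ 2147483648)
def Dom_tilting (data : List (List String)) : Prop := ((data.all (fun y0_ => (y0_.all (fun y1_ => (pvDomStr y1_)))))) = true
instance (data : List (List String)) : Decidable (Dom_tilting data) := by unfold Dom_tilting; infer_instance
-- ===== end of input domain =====

-- B is an alternative decomposition: per row, segments between '#'s are counted and refilled,
-- instead of A's pointer-walk; both Pythons mutate each row in place — equivalence here is about the return value.

-- ===== PORT A =====
def tiltLineA (line : List String) : List String :=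
  ((PySem.List.enumerate line 0).foldl
    (fun (st : List String × Int) (p : Int × String) =>
      if p.2 = "#" then (st.1, p.1 + 1)
      else if p.2 = "O" then
        (PySem.List.pySetD (PySem.List.pySetD st.1 p.1 ".") st.2 "O", st.2 + 1)
      else st)
    (line, 0)).1

def tilting (data : List (List String)) : List (List String) := data.map tiltLineA

-- ===== PORT B =====
def o2dot (c : String) : String := if c = "O" then "." else c

def fillB (seg : List String) : List String :=
  List.replicate (PySem.List.count seg "O") "O" ++
    (seg.drop (PySem.List.count seg "O")).map o2dot

def tiltLineB (line : List String) : List String :=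
  let st := line.foldl
    (fun (st : List String × List String) ch =>
      if ch = "#" then (st.1 ++ fillB st.2 ++ ["#"], ([] : List String))
      else (st.1, st.2 ++ [ch]))
    (([] : List String), ([] : List String))
  st.1 ++ fillB st.2

def tilting_alt (data : List (List String)) : List (List String) := data.map tiltLineB

-- ===== PRECONDITION & SPEC =====
def Spec_tilting (data : List (List String)) (out : List (List String)) : Prop := out = tilting_alt data
instance (data : List (List String)) (out : List (List String)) : Decidable (Spec_tilting data out) := by unfold Spec_tilting; infer_instance

-- ===== CLAIM (what is proved, stated in full; the proofs are below) =====
def Claim_equal_tilting : Prop := ∀ (data : List (List String)), Dom_tilting data → Spec_tilting data (tilting data)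

-- ===== LEMMAS AND PROOFS =====

/-- Segment-recursion view of B's per-line loop. -/
def goB : List String → List String → List String
  | seg, [] => fillB seg
  | seg, ch :: rest =>
    if ch = "#" then fillB seg ++ "#" :: goB [] rest else goB (seg ++ [ch]) rest

theorem tiltLineB_fold (rest : List String) : ∀ (out seg : List String),
    (rest.foldl
        (fun (st : List String × List String) ch =>
          if ch = "#" then (st.1 ++ fillB st.2 ++ ["#"], ([] : List String))
          else (st.1, st.2 ++ [ch])) (out, seg)).1 ++
      fillB (rest.foldl
        (fun (st : List String × List String) ch =>
          if ch = "#" then (st.1 ++ fillB st.2 ++ ["#"], ([] : List String))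
          else (st.1, st.2 ++ [ch])) (out, seg)).2 = out ++ goB seg rest := by
  induction rest with
  | nil => intro out seg; simp [goB]
  | cons ch rest ih =>
    intro out seg
    rw [List.foldl_cons, goB]
    by_cases h : ch = "#"
    · subst h; simp only [reduceIte, ih]; simp
    · simp only [if_neg h, ih]

theorem fillB_eq (seg : List String) :
    fillB seg = List.replicate (seg.count "O") "O" ++ (seg.drop (seg.count "O")).map o2dot := by
  simp [fillB, PySem.List.count_eq]

theorem set_append_len {α : Type} (l₁ l₂ : List α) (a : α) :
    (l₁ ++ l₂).set l₁.length a = l₁ ++ l₂.set 0 a := by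
  induction l₁ with
  | nil => simp
  | cons x xs ih => simp [ih]

theorem tiltLineA_main (rest : List String) : ∀ (done seg : List String) (s f : Int),
    s = ((done.length + seg.length : Nat) : Int) →
    f = ((done.length + seg.count "O" : Nat) : Int) →
    ((PySem.List.enumerate rest s).foldl
      (fun (st : List String × Int) (p : Int × String) =>
        if p.2 = "#" then (st.1, p.1 + 1)
        else if p.2 = "O" then
          (PySem.List.pySetD (PySem.List.pySetD st.1 p.1 ".") st.2 "O", st.2 + 1)
        else st)
      (done ++ List.replicate (seg.count "O") "O" ++
        (seg.drop (seg.count "O")).map o2dot ++ rest, f)).1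
    = done ++ goB seg rest := by
  induction rest with
  | nil =>
    intro done seg s f hs hf
    simp [PySem.List.enumerate_nil, goB, fillB_eq]
  | cons ch rest ih =>
    intro done seg s f hs hf
    subst hs; subst hf
    have hk : seg.count "O" ≤ seg.length := List.count_le_length
    rw [PySem.List.enumerate_cons, List.foldl_cons]
    by_cases h1 : ch = "#"
    · subst h1
      simp only [reduceIte]
      have h2 := ih (done ++ List.replicate (seg.count "O") "O" ++
          (seg.drop (seg.count "O")).map o2dot ++ ["#"]) []
          (((done.length + seg.length : Nat) : Int) + 1)
          (((done.length + seg.length : Nat) : Int) + 1)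
          (by simp; omega) (by simp; omega)
      simp only [List.count_nil, List.replicate_zero, List.drop_nil, List.map_nil,
        List.append_nil] at h2
      rw [show done ++ List.replicate (seg.count "O") "O" ++
            (seg.drop (seg.count "O")).map o2dot ++ ("#" :: rest)
          = (done ++ List.replicate (seg.count "O") "O" ++
            (seg.drop (seg.count "O")).map o2dot ++ ["#"]) ++ rest by simp]
      rw [h2, goB, if_pos rfl, fillB_eq]
      simp
    · by_cases h2 : ch = "O"
      · subst h2
        simp only [if_neg h1, reduceIte]
        simp only [PySem.List.pySetD_natCast]
        have hgo : goB seg ("O" :: rest) = goB (seg ++ ["O"]) rest := by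
          rw [goB]; simp
        have hcnt : (seg ++ ["O"]).count "O" = seg.count "O" + 1 := by
          simp [List.count_append]
        have hlen1 : (done ++ List.replicate (seg.count "O") "O" ++
            (seg.drop (seg.count "O")).map o2dot).length = done.length + seg.length := by
          simp; omega
        have hset1 : (done ++ List.replicate (seg.count "O") "O" ++
              (seg.drop (seg.count "O")).map o2dot ++ ("O" :: rest)).set
                (done.length + seg.length) "."
            = done ++ List.replicate (seg.count "O") "O" ++
              ((seg.drop (seg.count "O")).map o2dot ++ ("." :: rest)) := by
          rw [← hlen1, set_append_len]; simp
        rw [hset1]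
        have hlen2 : (done ++ List.replicate (seg.count "O") "O").length
            = done.length + seg.count "O" := by simp
        have hset2 : (done ++ List.replicate (seg.count "O") "O" ++
              ((seg.drop (seg.count "O")).map o2dot ++ ("." :: rest))).set
                (done.length + seg.count "O") "O"
            = done ++ List.replicate (seg.count "O") "O" ++
              ((seg.drop (seg.count "O")).map o2dot ++ ("." :: rest)).set 0 "O" := by
          rw [← hlen2, set_append_len]
        rw [hset2, hgo]
        have h3 := ih done (seg ++ ["O"])
          (((done.length + seg.length : Nat) : Int) + 1)
          (((done.length + seg.count "O" : Nat) : Int) + 1)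
          (by simp; omega) (by rw [hcnt]; push_cast; omega)
        rw [hcnt] at h3
        refine Eq.trans ?_ h3
        by_cases hkn : seg.count "O" = seg.length
        · have hdrop : seg.drop (seg.count "O") = [] := by rw [hkn]; simp
          have hdrop2 : (seg ++ ["O"]).drop (seg.count "O" + 1) = [] := by
            apply List.drop_eq_nil_of_le; simp; omega
          rw [hdrop2]
          congr 2
          rw [hdrop]
          simp [List.replicate_succ']
        · have hklt : seg.count "O" < seg.length := lt_of_le_of_ne hk hkn
          have hdropm : (seg.drop (seg.count "O")).map o2dot
              = o2dot (seg[seg.count "O"]) :: (seg.drop (seg.count "O" + 1)).map o2dot := by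
            rw [List.drop_eq_getElem_cons hklt, List.map_cons]
          have hdrop2 : (seg ++ ["O"]).drop (seg.count "O" + 1)
              = seg.drop (seg.count "O" + 1) ++ ["O"] := by
            rw [List.drop_append_of_le_length (by omega)]
          rw [hdrop2]
          congr 2
          rw [hdropm]
          simp [List.replicate_succ', o2dot]
      · simp only [if_neg h1, if_neg h2]
        have hcnt : (seg ++ [ch]).count "O" = seg.count "O" := by
          simp [List.count_append, h2]
        have h3 := ih done (seg ++ [ch])
          (((done.length + seg.length : Nat) : Int) + 1)
          (((done.length + seg.count "O" : Nat) : Int))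
          (by simp; omega) (by rw [hcnt])
        rw [hcnt] at h3
        have hdrop : (seg ++ [ch]).drop (seg.count "O")
            = seg.drop (seg.count "O") ++ [ch] := by
          rw [List.drop_append_of_le_length hk]
        rw [hdrop] at h3
        have hgo : goB seg (ch :: rest) = goB (seg ++ [ch]) rest := by
          rw [goB]; simp [h1]
        rw [hgo, ← h3]
        congr 2
        simp [o2dot, h2]

theorem tiltLine_eq (line : List String) : tiltLineA line = tiltLineB line := by
  have hA := tiltLineA_main line [] [] 0 0 (by simp) (by simp)
  simp only [List.count_nil, List.replicate_zero, List.drop_nil, List.map_nil,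
    List.append_nil, List.nil_append] at hA
  have hB := tiltLineB_fold line [] []
  simp only [List.nil_append] at hB
  rw [tiltLineA, tiltLineB]
  rw [hA, ← hB]

-- ===== VERDICT (by name: the statement is the Claim_ definition above) =====
theorem tilting_spec : Claim_equal_tilting := by
  intro data _
  unfold Spec_tilting tilting tilting_alt
  exact List.map_congr_left (fun line _ => tiltLine_eq line)
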